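-- pv_equiv track=rewrite | github.com/fixxxera/Laina | Scripts/azamara.py | split_australia
-- ===== SOURCE A (Python) =====
-- def split_australia(ports):
--     p = ['Adelaide, Australia', 'Airlie Beach, Qld, Australia', 'Alotau',
--          'Ben Boyd National Park (Scenic Cruising Port)', 'Broome', 'Burnie', 'Busselton', 'Cairns, Australia',
--          'Cooktown', 'Eden', 'Esperance, Australia', 'Exmouth', 'Fiordland National Park (Scenic Cruising)',
--          'Fraser Island', 'Perth (Fremantle), Australia', 'Geraldton', 'Gladstone', 'Hamilton Island',
--          'Hobart, Tasmania', 'Kangaroo Island', 'Kimberley Coast (Scenic Cruising Port)', 'Mooloolaba - Sunshine Coast',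
--          'Mornington Peninsula', 'Napier, New Zealand', 'Picton, New Zealand', 'Port Lincoln', 'Portland, Maine',
--          'Stewart Island', 'Sydney Harbour Mooring (Scenic Cruising Port)', 'Townsville',
--          'White Island (Scenic Cruising Port)', 'Wilsons Promontory (Scenic Cruising Port)']
--
--     o = ['Benoa', 'Ko Chang', 'Komodo Island', 'Krabi', 'Bangkok/Laem Chabang, Thailand', 'Langkawi', 'Lombok',
--          'Makassar', 'Phuket, Thailand', 'Probolinggo', 'Sabang (Palau Weh)', 'Sihanoukville']
--
--     ip = ['Apia, Samoa', 'Conflict Islands', "Dili - Timor L'Este", 'Dravuni Island', 'Gizo Island', 'Honiara',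
--           'Kawanasausau Strait & Milne Bay (Scenic Cruising Port)', 'Kiriwina Island', 'Kitava',
--           'Lifou, Loyalty Island', 'Madang',
--           'Mutiny on the Bounty (Scenic Cruising Port)', "Nuku 'alofa, Tonga", 'Rabaul', 'Santo',
--           "Vavau (Neiafu), Tonga", 'Vitu Islands (Scenic Cruising Port)', 'Wewak', 'Lahaina (Maui), Hawaii']
--     ports_list = []
--     for i in range(len(ports)):
--
--         if i == 0:
--             pass
--         else:
--             ports_list.append(ports[i])
--     result = []
--     is_exotic = False
--     is_pacific = False
--     for element in o:
--         if element in ports_list: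
--             is_exotic = True
--     if not is_exotic:
--         for element in ip:
--             if element in ports_list:
--                 is_pacific = True
--     if not is_pacific:
--         for element in p:
--             if element in ports_list:
--                 pass
--     if is_exotic:
--         result.append("Exotics")
--         result.append("O")
--         return result
--     elif is_pacific:
--         result.append("South Pacific -- All")
--         result.append("I")
--         return result
--     else:
--         result.append("Australia/New Zealand")
--         result.append("P")
--         return result
-- ===== SOURCE B (Python) =====
-- def split_australia(ports):
--     exotic = {'Benoa', 'Ko Chang', 'Komodo Island', 'Krabi', 'Bangkok/Laem Chabang, Thailand',
--               'Langkawi', 'Lombok', 'Makassar', 'Phuket, Thailand', 'Probolinggo',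
--               'Sabang (Palau Weh)', 'Sihanoukville'}
--     pacific = {'Apia, Samoa', 'Conflict Islands', "Dili - Timor L'Este", 'Dravuni Island',
--                'Gizo Island', 'Honiara', 'Kawanasausau Strait & Milne Bay (Scenic Cruising Port)',
--                'Kiriwina Island', 'Kitava', 'Lifou, Loyalty Island', 'Madang',
--                'Mutiny on the Bounty (Scenic Cruising Port)', "Nuku 'alofa, Tonga", 'Rabaul',
--                'Santo', "Vavau (Neiafu), Tonga", 'Vitu Islands (Scenic Cruising Port)', 'Wewak',
--                'Lahaina (Maui), Hawaii'}
--     is_exotic = False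
--     is_pacific = False
--     for port in ports[1:]:
--         is_exotic = is_exotic or port in exotic
--         is_pacific = is_pacific or port in pacific
--     if is_exotic:
--         return ['Exotics', 'O']
--     elif is_pacific:
--         return ['South Pacific -- All', 'I']
--     else:
--         return ['Australia/New Zealand', 'P']
-- ===== Notes on version B (the rewrite author's own statement) =====
-- stated objective: faster
-- what changed: One input-driven pass over ports[1:] with two independent flags and O(1) set membership, replacing A's index loop that rebuilds the list plus one linear scan of that list per category element and the dead Australia loop; exotic-over-pacific priority is preserved by the final if/elif.
import Mathlib
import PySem

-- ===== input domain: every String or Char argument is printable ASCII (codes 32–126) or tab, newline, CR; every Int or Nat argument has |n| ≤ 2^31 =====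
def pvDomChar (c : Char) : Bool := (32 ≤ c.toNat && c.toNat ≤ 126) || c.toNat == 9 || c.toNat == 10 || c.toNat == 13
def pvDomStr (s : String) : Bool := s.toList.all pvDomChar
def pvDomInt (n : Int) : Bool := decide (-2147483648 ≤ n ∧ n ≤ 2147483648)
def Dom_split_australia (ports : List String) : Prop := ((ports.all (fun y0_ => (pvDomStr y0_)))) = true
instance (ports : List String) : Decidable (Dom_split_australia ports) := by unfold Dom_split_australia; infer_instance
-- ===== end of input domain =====

-- B changes: one pass over ports[1:] with two independent set-membership flags, instead of A's
-- index loop rebuilding the list plus one scan of the input per category element (objective: simpler).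

-- ===== PORT A =====
-- A's list o (exotic ports)
def aO : List String :=
  ["Benoa", "Ko Chang", "Komodo Island", "Krabi", "Bangkok/Laem Chabang, Thailand",
   "Langkawi", "Lombok", "Makassar", "Phuket, Thailand", "Probolinggo",
   "Sabang (Palau Weh)", "Sihanoukville"]

-- A's list ip (south-pacific ports)
def aIP : List String :=
  ["Apia, Samoa", "Conflict Islands", "Dili - Timor L'Este", "Dravuni Island",
   "Gizo Island", "Honiara", "Kawanasausau Strait & Milne Bay (Scenic Cruising Port)",
   "Kiriwina Island", "Kitava", "Lifou, Loyalty Island", "Madang",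
   "Mutiny on the Bounty (Scenic Cruising Port)", "Nuku 'alofa, Tonga", "Rabaul",
   "Santo", "Vavau (Neiafu), Tonga", "Vitu Islands (Scenic Cruising Port)", "Wewak",
   "Lahaina (Maui), Hawaii"]

-- A's list p and its loop ('for element in p: if element in ports_list: pass') change no state
-- and are omitted: a literal no-op.
def split_australia (ports : List String) : List String :=
  -- for i in range(len(ports)): if i == 0: pass else: ports_list.append(ports[i])
  let ports_list := (List.range ports.length).foldl
    (fun acc i => if i = 0 then acc else acc ++ [ports.getD i ""]) []
  -- for element in o: if element in ports_list: is_exotic = True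
  let is_exotic := aO.foldl (fun b e => if ports_list.contains e then true else b) false
  -- if not is_exotic: for element in ip: ...
  let is_pacific := if !is_exotic then
      aIP.foldl (fun b e => if ports_list.contains e then true else b) false
    else false
  if is_exotic then ["Exotics", "O"]
  else if is_pacific then ["South Pacific -- All", "I"]
  else ["Australia/New Zealand", "P"]

-- ===== PORT B =====
def bExotic : PySem.Set String := PySem.Set.ofList aO
def bPacific : PySem.Set String := PySem.Set.ofList aIP

def split_australia_alt (ports : List String) : List String :=
  let rest := ports.drop 1   -- ports[1:]
  let flags := rest.foldl
    (fun s port => (s.1 || bExotic.contains port, s.2 || bPacific.contains port))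
    (false, false)
  if flags.1 then ["Exotics", "O"]
  else if flags.2 then ["South Pacific -- All", "I"]
  else ["Australia/New Zealand", "P"]

-- ===== PRECONDITION & SPEC =====
def Spec_split_australia (ports : List String) (out : List String) : Prop := out = split_australia_alt ports
instance (ports : List String) (out : List String) : Decidable (Spec_split_australia ports out) := by unfold Spec_split_australia; infer_instance

-- ===== CLAIM (what is proved, stated in full; the proofs are below) =====
def Claim_equal_split_australia : Prop := ∀ (ports : List String), Dom_split_australia ports → Spec_split_australia ports (split_australia ports)

-- ===== LEMMAS AND PROOFS =====

-- A's index loop builds exactly ports[1:]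
theorem portsList_eq (ports : List String) (n : Nat) (hn : n ≤ ports.length) :
    (List.range n).foldl
      (fun acc i => if i = 0 then acc else acc ++ [ports.getD i ""]) []
      = (ports.take n).drop 1 := by
  induction n with
  | zero => simp
  | succ m ih =>
    rw [List.range_succ, List.foldl_append]
    rw [ih (by omega)]
    simp only [List.foldl_cons, List.foldl_nil]
    by_cases hm : m = 0
    · subst hm; simp
    · have hlt : m < ports.length := by omega
      rw [if_neg hm, List.getD_eq_getElem ports "" hlt,
        List.take_add_one, List.getElem?_eq_getElem hlt]
      simp only [Option.toList_some]
      rw [List.drop_append_of_le_length (by simp; omega)]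

-- A's flag loop over a category list computes 'any element is in rest'
theorem flagFold (cat rest : List String) (b : Bool) :
    cat.foldl (fun b e => if rest.contains e then true else b) b
      = (b || cat.any (fun e => rest.contains e)) := by
  induction cat generalizing b with
  | nil => simp
  | cons x xs ih =>
    rw [List.foldl_cons]
    cases h : rest.contains x
    · rw [if_neg (by simp [h]), ih, List.any_cons, h]
      simp
    · rw [if_pos (by simp [h]), ih, List.any_cons, h]
      simp only [Bool.true_or, Bool.or_true]

-- scanning the categories for members of rest = scanning rest for category members
theorem any_comm (cat rest : List String) :
    cat.any (fun e => rest.contains e) = rest.any (fun x => cat.contains x) := by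
  rw [Bool.eq_iff_iff]
  simp only [List.any_eq_true, List.contains_iff_mem]
  exact ⟨fun ⟨e, h1, h2⟩ => ⟨e, h2, h1⟩, fun ⟨e, h1, h2⟩ => ⟨e, h2, h1⟩⟩

-- B's single pass computes the two 'any' flags
theorem pairFold (l : List String) (a b : Bool) :
    l.foldl (fun s port => (s.1 || bExotic.contains port, s.2 || bPacific.contains port)) (a, b)
      = (a || l.any (fun x => bExotic.contains x), b || l.any (fun x => bPacific.contains x)) := by
  induction l generalizing a b with
  | nil => simp
  | cons x xs ih =>
    rw [List.foldl_cons]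
    show List.foldl _ ((a || bExotic.contains x, b || bPacific.contains x)) xs = _
    rw [ih, List.any_cons, List.any_cons]
    simp [Bool.or_assoc]

theorem contains_bExotic (x : String) : bExotic.contains x = aO.contains x := by
  simp [bExotic, PySem.Set.mem_ofList]

theorem contains_bPacific (x : String) : bPacific.contains x = aIP.contains x := by
  simp [bPacific, PySem.Set.mem_ofList]

-- ===== VERDICT (by name: the statement is the Claim_ definition above) =====
theorem split_australia_spec : Claim_equal_split_australia := by
  intro ports _
  unfold Spec_split_australia split_australia split_australia_alt
  have hrest : (List.range ports.length).foldl
      (fun acc i => if i = 0 then acc else acc ++ [ports.getD i ""]) []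
      = ports.drop 1 := by
    rw [portsList_eq ports ports.length le_rfl, List.take_length]
  simp only [hrest, flagFold, pairFold, Bool.false_or]
  have he : (fun x => bExotic.contains x) = (fun x => aO.contains x) := by
    funext x; exact contains_bExotic x
  have hp : (fun x => bPacific.contains x) = (fun x => aIP.contains x) := by
    funext x; exact contains_bPacific x
  rw [he, hp, any_comm aO, any_comm aIP]
  cases hex : (ports.drop 1).any (fun x => aO.contains x) <;> simp [hex]
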